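-- pv_equiv track=rewrite | github.com/97549783/genealogy | school_comparison.py | filter_columns_by_nodes
-- ===== SOURCE A (Python) =====
-- from typing import Callable, Dict, List, Literal, Optional, Set, Tuple
--
-- def is_descendant_of(code: str, ancestor: str) -> bool:
--     """Проверяет, является ли code потомком ancestor."""
--     if code == ancestor:
--         return True
--     return code.startswith(ancestor + ".")
--
-- def filter_columns_by_nodes(
--     columns: List[str],
--     selected_nodes: Optional[List[str]] = None
-- ) -> List[str]:
--     """Фильтрует колонки по выбранным узлам."""
--     if selected_nodes is None or len(selected_nodes) == 0:
--         return columns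
--
--     filtered = []
--     for col in columns:
--         for node in selected_nodes:
--             if is_descendant_of(col, node):
--                 filtered.append(col)
--                 break
--
--     return filtered
-- ===== SOURCE B (Python) =====
-- from typing import List, Optional
--
-- def filter_columns_by_nodes(
--     columns: List[str],
--     selected_nodes: Optional[List[str]] = None
-- ) -> List[str]:
--     if selected_nodes is None or len(selected_nodes) == 0:
--         return columns
--     node_set = set(selected_nodes)
--     out = []
--     for col in columns:
--         prefixes = [col[:i] for i in range(len(col)) if col[i] == '.'] + [col]
--         if any(p in node_set for p in prefixes):
--             out.append(col)
--     return out
-- ===== Notes on version B (the rewrite author's own statement) =====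
-- stated objective: faster
-- what changed: Instead of testing every selected node against each column, B enumerates each column's dot-boundary prefixes once and checks them against a set built from the selected nodes, so the inner work is per column-length instead of per node.
import Mathlib
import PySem

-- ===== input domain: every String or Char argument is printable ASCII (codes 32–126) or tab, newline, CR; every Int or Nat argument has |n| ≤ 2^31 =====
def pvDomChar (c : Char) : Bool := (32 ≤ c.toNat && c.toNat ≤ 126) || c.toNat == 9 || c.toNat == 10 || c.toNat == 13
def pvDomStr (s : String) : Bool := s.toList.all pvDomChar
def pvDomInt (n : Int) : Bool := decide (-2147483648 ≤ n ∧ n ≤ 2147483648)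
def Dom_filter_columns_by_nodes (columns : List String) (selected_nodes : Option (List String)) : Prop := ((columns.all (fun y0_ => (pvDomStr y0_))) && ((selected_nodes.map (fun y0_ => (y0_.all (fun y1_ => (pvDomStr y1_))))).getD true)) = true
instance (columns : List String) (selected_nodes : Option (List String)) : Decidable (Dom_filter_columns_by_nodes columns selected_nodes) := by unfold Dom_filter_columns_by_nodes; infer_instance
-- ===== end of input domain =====

-- B replaces A's per-column scan over all selected nodes by enumerating the column's
-- dot-boundary prefixes and testing each against a set of the selected nodes (objective: alternative).

-- ===== PORT A =====
-- is_descendant_of(code, ancestor): code == ancestor or code.startswith(ancestor + ".")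
-- (string equality and concatenation are taken on the character lists, which is exact)
def is_descendant_of (code ancestor : String) : Bool :=
  if code.toList = ancestor.toList then true
  else PySem.Chars.startswith code.toList (ancestor.toList ++ ['.'])

-- the inner 'for node in selected_nodes: if …: append; break' — true iff the break fires
def pvAnyNodeA (col : String) : List String → Bool
  | [] => false
  | n :: rest => if is_descendant_of col n then true else pvAnyNodeA col rest

def filter_columns_by_nodes (columns : List String) (selected_nodes : Option (List String)) : List String :=
  match selected_nodes with
  | none => columns
  | some nodes =>
    if nodes.length = 0 then columns
    else columns.foldl (fun filtered col =>
      if pvAnyNodeA col nodes then filtered ++ [col] else filtered) []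

-- ===== PORT B =====
-- [col[:i] for i in range(len(col)) if col[i] == '.'] + [col]  (0 ≤ i < len: col[:i] is take i, col[i] is getElem?)
def pvPrefixesB (col : List Char) : List (List Char) :=
  ((List.range col.length).filterMap (fun i =>
    if col[i]? = some '.' then some (col.take i) else none)) ++ [col]

def filter_columns_by_nodes_alt (columns : List String) (selected_nodes : Option (List String)) : List String :=
  match selected_nodes with
  | none => columns
  | some nodes =>
    if nodes.length = 0 then columns
    else
      let node_set : PySem.Set (List Char) := PySem.Set.ofList (nodes.map String.toList)
      columns.foldl (fun out col =>
        if (pvPrefixesB col.toList).any (fun p => PySem.Set.contains node_set p) then out ++ [col]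
        else out) []

-- ===== PRECONDITION & SPEC =====
def Spec_filter_columns_by_nodes (columns : List String) (selected_nodes : Option (List String)) (out : List String) : Prop := out = filter_columns_by_nodes_alt columns selected_nodes
instance (columns : List String) (selected_nodes : Option (List String)) (out : List String) : Decidable (Spec_filter_columns_by_nodes columns selected_nodes out) := by unfold Spec_filter_columns_by_nodes; infer_instance

-- ===== CLAIM (what is proved, stated in full; the proofs are below) =====
def Claim_equal_filter_columns_by_nodes : Prop := ∀ (columns : List String) (selected_nodes : Option (List String)), Dom_filter_columns_by_nodes columns selected_nodes → Spec_filter_columns_by_nodes columns selected_nodes (filter_columns_by_nodes columns selected_nodes)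

-- ===== LEMMAS AND PROOFS =====

-- membership in B's prefix list = A's descendant test (on char lists)
theorem mem_prefixesB {n col : List Char} :
    n ∈ pvPrefixesB col ↔ (n = col ∨ (n ++ ['.']) <+: col) := by
  unfold pvPrefixesB
  simp only [List.mem_append, List.mem_filterMap, List.mem_range, List.mem_singleton]
  constructor
  · rintro (⟨i, hi, h⟩ | h)
    · split at h
      · rename_i hdot
        cases h
        right
        have hlt : i < col.length := hi
        have : col.take i ++ ['.'] = col.take (i + 1) := by
          rw [List.take_add_one, hdot]; rfl
        rw [this]
        exact List.take_prefix _ _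
      · simp at h
    · exact Or.inl h
  · rintro (h | h)
    · exact Or.inr h
    · left
      refine ⟨n.length, ?_, ?_⟩
      · have := h.length_le
        simp at this; omega
      · have htake : col.take (n.length + 1) = n ++ ['.'] := by
          have := (List.prefix_iff_eq_take.mp h).symm
          simpa using this
        have hdot : col[n.length]? = some '.' := by
          have hlen : n.length < col.length := by
            have := h.length_le; simp at this; omega
          have := List.take_add_one (l := col) (i := n.length)
          rw [htake] at this
          have h2 : col.take n.length = n := by
            have := congrArg (List.take n.length) htake
            simpa [List.take_take, List.take_append_of_le_length (le_refl n.length),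
              List.take_length] using this
          rw [h2] at this
          have : ['.'] = col[n.length]?.toList := List.append_cancel_left this
          cases hg : col[n.length]? with
          | none => rw [hg] at this; simp at this
          | some c => rw [hg] at this; simp at this; rw [← this]
        rw [hdot]
        simp only [reduceIte, Option.some.injEq]
        have hlen : n.length < col.length := by
          have := h.length_le; simp at this; omega
        have := congrArg (List.take n.length) ((List.prefix_iff_eq_take.mp h))
        simpa [List.take_take, List.take_append_of_le_length (le_refl n.length),
          List.take_length] using this.symm

-- A's inner break-loop = B's any-prefix-in-set test
theorem inner_eq (col : String) (nodes : List String) :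
    pvAnyNodeA col nodes
      = (pvPrefixesB col.toList).any
          (fun p => PySem.Set.contains (PySem.Set.ofList (nodes.map String.toList)) p) := by
  have hA : pvAnyNodeA col nodes = nodes.any (fun n => is_descendant_of col n) := by
    induction nodes with
    | nil => rfl
    | cons n rest ih =>
      simp only [pvAnyNodeA, List.any_cons, ih]
      by_cases h : is_descendant_of col n = true <;> simp [h]
  rw [hA]
  rw [Bool.eq_iff_iff]
  have hset : ∀ p : List Char,
      (PySem.Set.contains (PySem.Set.ofList (nodes.map String.toList)) p = true)
        ↔ p ∈ nodes.map String.toList := by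
    intro p
    simp [PySem.Set.contains, PySem.Set.mem_ofList]
  simp only [List.any_eq_true, hset, List.mem_map]
  constructor
  · rintro ⟨n, hn, hd⟩
    refine ⟨n.toList, mem_prefixesB.mpr ?_, ⟨n, hn, rfl⟩⟩
    unfold is_descendant_of at hd
    split at hd
    · rename_i heq; exact Or.inl heq.symm
    · exact Or.inr ((PySem.Chars.startswith_iff _ _).mp hd)
  · rintro ⟨p, hp, n, hn, hnp⟩
    refine ⟨n, hn, ?_⟩
    unfold is_descendant_of
    rcases mem_prefixesB.mp hp with h | h
    · rw [if_pos (by rw [hnp, h])]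
    · split
      · rfl
      · exact (PySem.Chars.startswith_iff _ _).mpr (by rw [hnp]; exact h)

-- ===== VERDICT (by name: the statement is the Claim_ definition above) =====
theorem filter_columns_by_nodes_spec : Claim_equal_filter_columns_by_nodes := by
  intro columns selected_nodes _
  unfold Spec_filter_columns_by_nodes filter_columns_by_nodes filter_columns_by_nodes_alt
  cases selected_nodes with
  | none => rfl
  | some nodes =>
    by_cases h : nodes.length = 0
    · simp [h]
    · simp only [if_neg h]
      apply PySem.List.foldl_congr_mem
      intro acc col _
      rw [inner_eq]
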